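-- pv_equiv track=rewrite | github.com/aaaeide/advent-of-code-2020 | d10.py | find_num_paths
-- ===== SOURCE A (Python) =====
-- from typing import List
--
-- def find_num_paths(adaps: List[int]) -> int:
--     # For each adap (node in a digraph from 0 to device's joltage), the
--     # number of paths to the goal is the sum of the number of paths from
--     # each adap reachable from the current adap. The problem exhibits
--     # OPTIMAL SUBSTRUCTURE – an optimal solution is composed from optimal
--     # solutions to related, independently solvable subproblems.
--     adapset = set(adaps)
--     memo = [0] * (max(adapset) + 1)
--
--     def find_num_paths_from(frm: int) -> int:
--         if memo[frm] != 0: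
--             return memo[frm]
--
--         res = 0
--         reachable_adaps = adapset.intersection(
--             set([frm + i for i in range(1, 4)]))
--
--         # base case – final adap:
--         if len(reachable_adaps) == 0:
--             res = 1
--         else:
--             res = sum([find_num_paths_from(adap) for adap in reachable_adaps])
--
--         memo[frm] = res
--         return res
--
--     return find_num_paths_from(0)
-- ===== SOURCE B (Python) =====
-- def find_num_paths(adaps):
--     # Bottom-up DP over the adapters themselves, highest joltage first:
--     # dp[v] = number of paths from adapter v to the end; no recursion and
--     # no O(max)-sized table, only the adapter values are visited.
--     adapset = set(adaps)
--     dp = {}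
--     for v in sorted(adapset, reverse=True):
--         succ = [dp[v + d] for d in (1, 2, 3) if v + d in adapset]
--         dp[v] = sum(succ) if succ else 1
--     succ0 = [dp[d] for d in (1, 2, 3) if d in adapset]
--     return sum(succ0) if succ0 else 1
-- ===== Notes on version B (the rewrite author's own statement) =====
-- stated objective: alternative
-- what changed: Replaces the top-down memoized recursion over a memo array of size max+1 with an iterative bottom-up DP that sorts the adapter set descending and fills a dict keyed only by the adapter values, so no recursion and no max-sized table.
import Mathlib
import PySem

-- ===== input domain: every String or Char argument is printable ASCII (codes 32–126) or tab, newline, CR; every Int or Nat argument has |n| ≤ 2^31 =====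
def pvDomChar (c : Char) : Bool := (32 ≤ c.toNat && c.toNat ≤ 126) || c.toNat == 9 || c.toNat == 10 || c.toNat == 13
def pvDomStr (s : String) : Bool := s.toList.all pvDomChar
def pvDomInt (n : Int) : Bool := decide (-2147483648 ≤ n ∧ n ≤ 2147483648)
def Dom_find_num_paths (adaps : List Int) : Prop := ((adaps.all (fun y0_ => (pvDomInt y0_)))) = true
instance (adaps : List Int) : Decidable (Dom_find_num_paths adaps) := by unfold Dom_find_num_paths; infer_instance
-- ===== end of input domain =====

-- B replaces A's memoized recursion by a bottom-up DP over only the adapter values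
-- (sorted descending, dict-backed); equivalence is proved on Pre_ (nonempty input with max ≥ 0).

-- ===== PORT A =====
-- A's inner memoized recursion with the mutable memo list threaded through;
-- fuel is only a totality guard (the top call supplies more than the maximal depth,
-- so the fuel-0 branch is never reached on inputs admitted by Pre_).
mutual
def fnpFrom (adapset : List Int) (fuel : Nat) (memo : List Int) (frm : Int) : Int × List Int :=
  match fuel with
  | 0 => (0, memo)
  | Nat.succ fuel' =>
    -- if memo[frm] != 0: return memo[frm]   (frm is in range on admitted inputs)
    let hit := PySem.List.pyGetD memo frm 0
    if hit ≠ 0 then (hit, memo)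
    else
      -- reachable_adaps = adapset.intersection(set([frm+i for i in range(1,4)]))
      let reachable := PySem.Set.inter adapset (PySem.Set.ofList [frm + 1, frm + 2, frm + 3])
      if reachable = [] then (1, PySem.List.pySetD memo frm 1)
      else
        let p := fnpSum adapset fuel' memo reachable
        (p.1, PySem.List.pySetD p.2 frm p.1)
  termination_by (fuel, 0)

-- res = sum([find_num_paths_from(adap) for adap in reachable_adaps])
def fnpSum (adapset : List Int) (fuel : Nat) (memo : List Int) (l : List Int) : Int × List Int :=
  match l with
  | [] => (0, memo)
  | a :: rest =>
    let q := fnpFrom adapset fuel memo a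
    let r := fnpSum adapset fuel q.2 rest
    (q.1 + r.1, r.2)
  termination_by (fuel, l.length + 1)
end

def find_num_paths (adaps : List Int) : Int :=
  let adapset : PySem.Set Int := PySem.Set.ofList adaps
  match PySem.List.max? adapset (fun x => x) with
  | none => 0   -- max(adapset) raises ValueError on empty input: excluded by Pre_
  | some m =>
    -- memo = [0] * (max(adapset) + 1); when m < 0 Python raises IndexError at memo[0]
    -- (the guard default of pyGetD fires instead): those inputs are excluded by Pre_.
    let memo := List.replicate (m + 1).toNat 0
    (fnpFrom adapset ((m + 1).toNat + 1) memo 0).1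

-- ===== PORT B =====
def find_num_paths_alt (adaps : List Int) : Int :=
  let adapset : PySem.Set Int := PySem.Set.ofList adaps
  let dp := (PySem.List.sorted adapset (fun x => x) true).foldl
    (fun dp v =>
      -- succ = [dp[v + d] for d in (1, 2, 3) if v + d in adapset]
      -- (dp[v+d] never raises: v+d was processed earlier, so the getD default is a guard only)
      let succ := ([(1 : Int), 2, 3].filter (fun d => PySem.Set.contains adapset (v + d))).map
        (fun d => PySem.Dict.getD dp (v + d) 0)
      PySem.Dict.insert dp v (if succ = [] then 1 else succ.sum))
    (PySem.Dict.empty : PySem.Dict Int Int)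
  let succ0 := ([(1 : Int), 2, 3].filter (fun d => PySem.Set.contains adapset d)).map
    (fun d => PySem.Dict.getD dp d 0)
  if succ0 = [] then 1 else succ0.sum

-- ===== PRECONDITION & SPEC =====
-- Pre_ excludes exactly the inputs on which A raises: the empty list (ValueError from max)
-- and lists whose elements are all negative (memo is empty, memo[0] raises IndexError).
def Pre_find_num_paths (adaps : List Int) : Prop := adaps ≠ [] ∧ ∃ x ∈ adaps, 0 ≤ x
instance (adaps : List Int) : Decidable (Pre_find_num_paths adaps) := by unfold Pre_find_num_paths; infer_instance
def pvWitness_find_num_paths : List Int := [1, 2, 4]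

def Spec_find_num_paths (adaps : List Int) (out : Int) : Prop := out = find_num_paths_alt adaps
instance (adaps : List Int) (out : Int) : Decidable (Spec_find_num_paths adaps out) := by unfold Spec_find_num_paths; infer_instance

-- ===== CLAIM (what is proved, stated in full; the proofs are below) =====
def Claim_equal_find_num_paths : Prop := ∀ (adaps : List Int), Dom_find_num_paths adaps → Pre_find_num_paths adaps → Spec_find_num_paths adaps (find_num_paths adaps)

-- ===== LEMMAS AND PROOFS =====

-- The successors of i inside the adapter set, and the pure path-count function
-- (fuel-indexed; pvVal is its stable value for any upper bound m of the set).
def pvCand (s : List Int) (i : Int) : List Int :=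
  [i + 1, i + 2, i + 3].filter (fun j => PySem.Set.contains s j)

def pvF (s : List Int) : Nat → Int → Int
  | 0, _ => 0
  | Nat.succ fuel, i =>
    let r := pvCand s i
    if r = [] then 1 else (r.map (pvF s fuel)).sum

def pvVal (s : List Int) (m i : Int) : Int := pvF s ((m - i).toNat + 1) i

theorem mem_pvCand {s : List Int} {i j : Int} :
    j ∈ pvCand s i ↔ (j = i + 1 ∨ j = i + 2 ∨ j = i + 3) ∧ j ∈ s := by
  simp [pvCand, List.mem_filter]

theorem pvCand_nodup (s : List Int) (i : Int) : (pvCand s i).Nodup := by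
  apply List.Nodup.filter
  simp

theorem mem_pvCand_bounds {s : List Int} {m : Int} (hub : ∀ x ∈ s, x ≤ m) {i j : Int}
    (hj : j ∈ pvCand s i) : i < j ∧ j ≤ m ∧ (m - j).toNat < (m - i).toNat := by
  rcases mem_pvCand.1 hj with ⟨hd, hmem⟩
  have := hub j hmem
  omega

theorem pvF_stable {s : List Int} {m : Int} (hub : ∀ x ∈ s, x ≤ m) :
    ∀ fuel i, (m - i).toNat < fuel → pvF s fuel i = pvVal s m i := by
  intro fuel
  induction fuel using Nat.strong_induction_on with
  | _ fuel IH =>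
    intro i hi
    match fuel, hi with
    | Nat.succ n, hi =>
      show pvF s (n + 1) i = pvF s ((m - i).toNat + 1) i
      simp only [pvF]
      by_cases hr : pvCand s i = []
      · simp [hr]
      · simp only [hr, if_false]
        refine congrArg List.sum (List.map_congr_left ?_)
        intro j hj
        rcases mem_pvCand_bounds hub hj with ⟨h1, h2, h3⟩
        rw [IH n (by omega) j (by omega), IH (m - i).toNat (by omega) j (by omega)]

theorem pvVal_rec {s : List Int} {m : Int} (hub : ∀ x ∈ s, x ≤ m) (i : Int) :
    pvVal s m i = if pvCand s i = [] then 1 else ((pvCand s i).map (pvVal s m)).sum := by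
  show pvF s ((m - i).toNat + 1) i = _
  simp only [pvF]
  by_cases hr : pvCand s i = []
  · simp [hr]
  · simp only [hr, if_false]
    refine congrArg List.sum (List.map_congr_left ?_)
    intro j hj
    rcases mem_pvCand_bounds hub hj with ⟨h1, h2, h3⟩
    exact pvF_stable hub _ j (by omega)

-- A-side: memo invariant and correctness of the memoized recursion
def pvGood (s : List Int) (m : Int) (memo : List Int) : Prop :=
  ∀ (p : Nat) (v : Int), memo[p]? = some v → v = 0 ∨ v = pvVal s m (p : Int)

theorem pvGood_set {s : List Int} {m : Int} {memo : List Int} (hG : pvGood s m memo)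
    {i : Int} (h0 : 0 ≤ i) {v : Int} (hval : v = pvVal s m i) :
    pvGood s m (PySem.List.pySetD memo i v) := by
  rw [PySem.List.pySetD_of_nonneg _ _ h0]
  intro p w hp
  rw [List.getElem?_set] at hp
  by_cases hpi : i.toNat = p
  · subst hpi
    rw [if_pos rfl] at hp
    by_cases hlen : i.toNat < memo.length
    · rw [if_pos hlen] at hp
      right
      have hw : v = w := Option.some.inj hp
      rw [← hw, show ((i.toNat : Nat) : Int) = i from by omega, hval]
    · rw [if_neg hlen] at hp
      cases hp
  · rw [if_neg hpi] at hp
    exact hG _ _ hp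

theorem pvGood_pyGetD {s : List Int} {m : Int} {memo : List Int} (hG : pvGood s m memo)
    {i : Int} (h0 : 0 ≤ i) :
    PySem.List.pyGetD memo i 0 = 0 ∨ PySem.List.pyGetD memo i 0 = pvVal s m i := by
  have hcast : ((i.toNat : Nat) : Int) = i := by omega
  rw [← hcast, PySem.List.pyGetD_natCast]
  rw [List.getD_eq_getElem?_getD]
  cases h : memo[i.toNat]? with
  | none => simp
  | some v =>
    rcases hG _ _ h with h0' | h1
    · simp [h0']
    · right; simpa using h1

theorem fnpSum_correct {s : List Int} {m : Int} (fuel : Nat)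
    (H : ∀ memo frm, pvGood s m memo → 0 ≤ frm → (m - frm).toNat < fuel →
      (fnpFrom s fuel memo frm).1 = pvVal s m frm ∧ pvGood s m (fnpFrom s fuel memo frm).2) :
    ∀ (l : List Int) (memo : List Int), pvGood s m memo →
      (∀ a ∈ l, 0 ≤ a ∧ (m - a).toNat < fuel) →
      (fnpSum s fuel memo l).1 = (l.map (pvVal s m)).sum ∧ pvGood s m (fnpSum s fuel memo l).2 := by
  intro l
  induction l with
  | nil => intro memo hG _; simp [fnpSum, hG]
  | cons a rest IH =>
    intro memo hG hb
    rcases H memo a hG (hb a (by simp)).1 (hb a (by simp)).2 with ⟨hq1, hq2⟩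
    rcases IH (fnpFrom s fuel memo a).2 hq2 (fun x hx => hb x (by simp [hx])) with ⟨hr1, hr2⟩
    rw [fnpSum]
    constructor
    · simp only [hq1, hr1, List.map_cons, List.sum_cons]
    · exact hr2

theorem fnpFrom_correct {s : List Int} {m : Int} (hs : s.Nodup) (hub : ∀ x ∈ s, x ≤ m) :
    ∀ fuel memo frm, pvGood s m memo → 0 ≤ frm → (m - frm).toNat < fuel →
      (fnpFrom s fuel memo frm).1 = pvVal s m frm ∧ pvGood s m (fnpFrom s fuel memo frm).2 := by
  intro fuel
  induction fuel with
  | zero => intro memo frm _ _ h; omega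
  | succ n IH =>
    intro memo frm hG h0 hf
    have hperm : (PySem.Set.inter s (PySem.Set.ofList [frm + 1, frm + 2, frm + 3])).Perm
        (pvCand s frm) := by
      apply (List.perm_ext_iff_of_nodup (PySem.Set.nodup_inter _ _ hs) (pvCand_nodup s frm)).2
      intro y
      rw [PySem.Set.mem_inter, PySem.Set.mem_ofList, mem_pvCand]
      simp
      tauto
    rw [fnpFrom]
    rcases pvGood_pyGetD hG h0 with hz | hv
    · rw [hz]
      simp only [ne_eq, not_true_eq_false, if_false]
      by_cases hr : PySem.Set.inter s (PySem.Set.ofList [frm + 1, frm + 2, frm + 3]) = []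
      · have hc : pvCand s frm = [] := by
          rw [hr] at hperm; exact hperm.symm.eq_nil
        have hval : (1 : Int) = pvVal s m frm := by rw [pvVal_rec hub, if_pos hc]
        rw [if_pos hr]
        exact ⟨hval.symm ▸ rfl, pvGood_set hG h0 hval⟩
      · rw [if_neg hr]
        have hc : pvCand s frm ≠ [] := fun h => hr (by
          have := hperm; rw [h] at this; exact this.eq_nil)
        have hbound : ∀ a ∈ PySem.Set.inter s (PySem.Set.ofList [frm + 1, frm + 2, frm + 3]),
            0 ≤ a ∧ (m - a).toNat < n := by
          intro a ha
          have ha' : a ∈ pvCand s frm := hperm.mem_iff.1 ha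
          rcases mem_pvCand_bounds hub ha' with ⟨h1, h2, h3⟩
          exact ⟨by omega, by omega⟩
        rcases fnpSum_correct n IH _ memo hG hbound with ⟨h1, h2⟩
        have hsum : (fnpSum s n memo (PySem.Set.inter s (PySem.Set.ofList [frm + 1, frm + 2, frm + 3]))).1
            = pvVal s m frm := by
          rw [h1, pvVal_rec hub frm, if_neg hc]
          exact (hperm.map (pvVal s m)).sum_eq
        exact ⟨hsum ▸ rfl, pvGood_set h2 h0 hsum⟩
    · by_cases hv0 : pvVal s m frm = 0
      · rw [hv0] at hv
        rw [hv]
        simp only [ne_eq, not_true_eq_false, if_false]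
        by_cases hr : PySem.Set.inter s (PySem.Set.ofList [frm + 1, frm + 2, frm + 3]) = []
        · have hc : pvCand s frm = [] := by
            rw [hr] at hperm; exact hperm.symm.eq_nil
          have hval : (1 : Int) = pvVal s m frm := by rw [pvVal_rec hub, if_pos hc]
          rw [if_pos hr]
          exact ⟨hval.symm ▸ rfl, pvGood_set hG h0 hval⟩
        · rw [if_neg hr]
          have hc : pvCand s frm ≠ [] := fun h => hr (by
            have := hperm; rw [h] at this; exact this.eq_nil)
          have hbound : ∀ a ∈ PySem.Set.inter s (PySem.Set.ofList [frm + 1, frm + 2, frm + 3]),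
              0 ≤ a ∧ (m - a).toNat < n := by
            intro a ha
            have ha' : a ∈ pvCand s frm := hperm.mem_iff.1 ha
            rcases mem_pvCand_bounds hub ha' with ⟨h1, h2, h3⟩
            exact ⟨by omega, by omega⟩
          rcases fnpSum_correct n IH _ memo hG hbound with ⟨h1, h2⟩
          have hsum : (fnpSum s n memo (PySem.Set.inter s (PySem.Set.ofList [frm + 1, frm + 2, frm + 3]))).1
              = pvVal s m frm := by
            rw [h1, pvVal_rec hub frm, if_neg hc]
            exact (hperm.map (pvVal s m)).sum_eq
          exact ⟨hsum ▸ rfl, pvGood_set h2 h0 hsum⟩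
      · rw [hv, if_pos hv0]
        exact ⟨rfl, hG⟩

-- B-side: loop invariant for the descending fold
theorem fnpAlt_loop {s : List Int} {m : Int} (hub : ∀ x ∈ s, x ≤ m) :
    ∀ (l : List Int) (dp : PySem.Dict Int Int),
      (∀ x ∈ l, x ∈ s) → l.Pairwise (· > ·) →
      (∀ w ∈ s, w ∉ l → PySem.Dict.get? dp w = some (pvVal s m w)) →
      ∀ w ∈ s, PySem.Dict.get? (l.foldl
        (fun dp v => PySem.Dict.insert dp v
          (if ([(1 : Int), 2, 3].filter (fun d => PySem.Set.contains s (v + d))).map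
              (fun d => PySem.Dict.getD dp (v + d) 0) = [] then 1
           else (([(1 : Int), 2, 3].filter (fun d => PySem.Set.contains s (v + d))).map
              (fun d => PySem.Dict.getD dp (v + d) 0)).sum)) dp) w
        = some (pvVal s m w) := by
  intro l
  induction l with
  | nil =>
    intro dp _ _ hinv w hw
    simpa using hinv w hw (by simp)
  | cons v rest IH =>
    intro dp hsub hpw hinv w hw
    rw [List.foldl_cons]
    have hlt : ∀ y ∈ rest, y < v := (List.pairwise_cons.1 hpw).1
    refine IH _ (fun x hx => hsub x (by simp [hx])) (List.pairwise_cons.1 hpw).2 ?_ w hw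
    intro w' hw' hnot
    by_cases hwv : w' = v
    · subst hwv
      have hsucc : ([(1 : Int), 2, 3].filter (fun d => PySem.Set.contains s (w' + d))).map
          (fun d => PySem.Dict.getD dp (w' + d) 0) = (pvCand s w').map (pvVal s m) := by
        have hcand : pvCand s w' = ([(1 : Int), 2, 3].filter
            (fun d => PySem.Set.contains s (w' + d))).map (fun d => w' + d) := by
          have hm3 : [w' + 1, w' + 2, w' + 3] = [(1 : Int), 2, 3].map (fun d => w' + d) := by
            simp
          rw [pvCand, hm3, List.filter_map]
          rfl
        rw [hcand, List.map_map]
        apply List.map_congr_left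
        intro d hd
        rcases List.mem_filter.1 hd with ⟨hd3, hds⟩
        have hdmem : w' + d ∈ s := (PySem.Set.contains_iff _ _).1 hds
        have hd1 : 1 ≤ d := by
          simp at hd3
          rcases hd3 with h | h | h <;> omega
        have hget := hinv (w' + d) hdmem (by
          simp only [List.mem_cons, not_or]
          constructor
          · omega
          · intro hmem
            have := hlt _ hmem
            omega)
        rw [PySem.Dict.getD_eq_get?_getD, hget]
        rfl
      show PySem.Dict.get? (PySem.Dict.insert dp w'
          (if ([(1 : Int), 2, 3].filter (fun d => PySem.Set.contains s (w' + d))).map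
              (fun d => PySem.Dict.getD dp (w' + d) 0) = [] then 1
           else (([(1 : Int), 2, 3].filter (fun d => PySem.Set.contains s (w' + d))).map
              (fun d => PySem.Dict.getD dp (w' + d) 0)).sum)) w' = some (pvVal s m w')
      rw [PySem.Dict.get?_insert_self]
      congr 1
      rw [hsucc, pvVal_rec hub w']
      by_cases hc : pvCand s w' = []
      · simp [hc]
      · rw [if_neg hc, if_neg (by simpa [List.map_eq_nil_iff] using hc)]
    · show PySem.Dict.get? (PySem.Dict.insert dp v _) w' = some (pvVal s m w')
      rw [PySem.Dict.get?_insert_of_ne _ _ hwv]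
      exact hinv w' hw' (by simp [hwv, hnot])

-- ===== VERDICT (by name: the statement is the Claim_ definition above) =====
theorem find_num_paths_spec : Claim_equal_find_num_paths := by
  intro adaps _ hPre
  unfold Spec_find_num_paths
  obtain ⟨hne, x, hx, hx0⟩ := hPre
  have hs : (PySem.Set.ofList adaps).Nodup := PySem.Set.nodup_ofList adaps
  have hxs : x ∈ PySem.Set.ofList adaps := by
    rw [PySem.Set.mem_ofList]
    exact hx
  obtain ⟨m, hm⟩ : ∃ m, PySem.List.max? (PySem.Set.ofList adaps) (fun x => x) = some m := by
    cases h : PySem.List.max? (PySem.Set.ofList adaps) (fun x => x) with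
    | none =>
      have : PySem.Set.ofList adaps = [] := (PySem.List.max?_eq_none_iff _ _).1 h
      rw [this] at hxs
      simp at hxs
    | some m => exact ⟨m, rfl⟩
  have hub : ∀ y ∈ PySem.Set.ofList adaps, y ≤ m := PySem.List.max?_isMax hm
  have hm0 : 0 ≤ m := le_trans hx0 (hub x hxs)
  have hA : find_num_paths adaps = pvVal (PySem.Set.ofList adaps) m 0 := by
    simp only [find_num_paths, hm]
    exact (fnpFrom_correct hs hub _ _ 0
      (fun p v hp => Or.inl (by
        rw [List.getElem?_replicate] at hp
        split at hp
        · exact (Option.some.inj hp).symm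
        · cases hp))
      le_rfl (by omega)).1
  have hL1 : ∀ x' ∈ PySem.List.sorted (PySem.Set.ofList adaps) (fun x => x) true,
      x' ∈ PySem.Set.ofList adaps := by
    intro x' hx'
    exact (PySem.List.mem_sorted _ _ _ _).1 hx'
  have hL2 : (PySem.List.sorted (PySem.Set.ofList adaps) (fun x => x) true).Pairwise (· > ·) := by
    have h1 := PySem.List.sorted_pairwise_rev (PySem.Set.ofList adaps) (fun x => x)
    have h2 : (PySem.List.sorted (PySem.Set.ofList adaps) (fun x => x) true).Nodup :=
      ((PySem.List.sorted_perm _ _ _).nodup_iff).2 hs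
    exact (h1.and h2).imp (fun h => by omega)
  have hall := fnpAlt_loop hub (PySem.List.sorted (PySem.Set.ofList adaps) (fun x => x) true)
    PySem.Dict.empty hL1 hL2
    (fun w hw hnw => absurd ((PySem.List.mem_sorted _ _ _ _).2 hw) hnw)
  have hB : find_num_paths_alt adaps = pvVal (PySem.Set.ofList adaps) m 0 := by
    simp only [find_num_paths_alt]
    have hsucc0 : ([(1 : Int), 2, 3].filter (fun d => PySem.Set.contains (PySem.Set.ofList adaps) d)).map
        (fun d => PySem.Dict.getD ((PySem.List.sorted (PySem.Set.ofList adaps) (fun x => x) true).foldl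
          (fun dp v => PySem.Dict.insert dp v
            (if ([(1 : Int), 2, 3].filter (fun d => PySem.Set.contains (PySem.Set.ofList adaps) (v + d))).map
                (fun d => PySem.Dict.getD dp (v + d) 0) = [] then 1
             else (([(1 : Int), 2, 3].filter (fun d => PySem.Set.contains (PySem.Set.ofList adaps) (v + d))).map
                (fun d => PySem.Dict.getD dp (v + d) 0)).sum)) PySem.Dict.empty) d 0)
        = (pvCand (PySem.Set.ofList adaps) 0).map (pvVal (PySem.Set.ofList adaps) m) := by
      have hcand : pvCand (PySem.Set.ofList adaps) 0 = ([(1 : Int), 2, 3].filter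
          (fun d => PySem.Set.contains (PySem.Set.ofList adaps) d)).map (fun d => d) := by
        have hm3 : [(0 : Int) + 1, 0 + 2, 0 + 3] = [(1 : Int), 2, 3].map (fun d => d) := by
          norm_num
        rw [pvCand, hm3, List.filter_map]
        rfl
      rw [hcand, List.map_map]
      apply List.map_congr_left
      intro d hd
      rcases List.mem_filter.1 hd with ⟨_, hds⟩
      have hdmem : d ∈ PySem.Set.ofList adaps := (PySem.Set.contains_iff _ _).1 hds
      rw [PySem.Dict.getD_eq_get?_getD, hall d hdmem]
      rfl
    rw [hsucc0, pvVal_rec hub 0]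
    by_cases hc : pvCand (PySem.Set.ofList adaps) 0 = []
    · simp [hc]
    · rw [if_neg (by simpa [List.map_eq_nil_iff] using hc), if_neg hc]
  rw [hA, hB]
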